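-- pv_equiv track=rewrite | github.com/Hyunggeun447/momentom | programmers_weekly_8.1.py | solution
-- ===== SOURCE A (Python) =====
-- def solution(price, money, count):
--     answer = -1
--
--     x=[0]*(count+1)
--     x[1]=price
--     if count>=2:
--         for i in range(2,count+1):
--             x[i]=x[i-1]+i*price
--
--     answer=x[-1]-money
--     if answer<0:
--         answer=0
--
--     return answer
-- ===== SOURCE B (Python) =====
-- def solution(price, money, count):
--     total = price * count * (count + 1) // 2
--     return max(0, total - money)
-- ===== Notes on version B (the rewrite author's own statement) =====
-- stated objective: faster
-- what changed: Replaced A's O(count) dynamic-programming list of running purchase totals with the closed-form triangular sum price*count*(count+1)//2, clamped at 0 via max.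
import Mathlib
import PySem

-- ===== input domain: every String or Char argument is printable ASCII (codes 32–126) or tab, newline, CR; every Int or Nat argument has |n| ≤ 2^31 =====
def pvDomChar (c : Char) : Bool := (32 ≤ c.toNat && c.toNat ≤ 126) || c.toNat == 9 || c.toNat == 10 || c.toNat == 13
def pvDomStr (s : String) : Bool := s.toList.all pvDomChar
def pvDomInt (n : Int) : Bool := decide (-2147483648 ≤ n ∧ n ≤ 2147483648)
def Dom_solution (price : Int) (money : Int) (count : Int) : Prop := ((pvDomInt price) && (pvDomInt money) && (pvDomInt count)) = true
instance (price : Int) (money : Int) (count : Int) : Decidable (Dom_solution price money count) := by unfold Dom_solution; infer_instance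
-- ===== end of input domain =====

-- B replaces A's O(count) running-total list with the closed form price*count*(count+1)//2, clamped at 0.

-- ===== PORT A =====
-- Transliteration of A: builds x = [0]*(count+1), sets x[1] = price, fills x[i] = x[i-1] + i*price
-- for i in range(2, count+1), reads x[-1]. pySetD/pyGetD are the total forms of Python's
-- subscripting, exact under Pre_solution (count ≥ 1, all indices in range).
def solution (price : Int) (money : Int) (count : Int) : Int :=
  let x0 : List Int := List.replicate (count + 1).toNat 0
  let x1 := PySem.List.pySetD x0 1 price
  let x2 := if count ≥ 2 then
      (PySem.List.pyRange 2 (count + 1) 1).foldl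
        (fun x i => PySem.List.pySetD x i (PySem.List.pyGetD x (i - 1) 0 + i * price)) x1
    else x1
  let answer := PySem.List.pyGetD x2 (-1) 0 - money
  if answer < 0 then 0 else answer

-- ===== PORT B =====
def solution_alt (price : Int) (money : Int) (count : Int) : Int :=
  let total := PySem.Int.floordiv (price * count * (count + 1)) 2
  max 0 (total - money)

-- ===== PRECONDITION & SPEC =====
-- A raises IndexError (x[1] on a list of length ≤ 1) whenever count ≤ 0; count ≥ 1 is exactly
-- where A returns normally.
def Pre_solution (price : Int) (money : Int) (count : Int) : Prop := 1 ≤ count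
instance (price : Int) (money : Int) (count : Int) : Decidable (Pre_solution price money count) := by unfold Pre_solution; infer_instance
def pvWitness_solution : Int × Int × Int := (3, 20, 4)

def Spec_solution (price : Int) (money : Int) (count : Int) (out : Int) : Prop := out = solution_alt price money count
instance (price : Int) (money : Int) (count : Int) (out : Int) : Decidable (Spec_solution price money count out) := by unfold Spec_solution; infer_instance

-- ===== CLAIM (what is proved, stated in full; the proofs are below) =====
def Claim_equal_solution : Prop := ∀ (price : Int) (money : Int) (count : Int), Dom_solution price money count → Pre_solution price money count → Spec_solution price money count (solution price money count)

-- ===== LEMMAS AND PROOFS =====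

-- triangular number 1 + 2 + ... + j
def tri (j : Nat) : Nat := j * (j + 1) / 2

theorem tri_succ (k : Nat) : tri (k + 1) = tri k + (k + 1) := by
  have h : (k + 1) * (k + 1 + 1) = k * (k + 1) + 2 * (k + 1) := by ring
  unfold tri; omega

-- the state of A's list after the loop has processed i = 2 .. k
def stateA (price : Int) (n k : Nat) : List Int :=
  (List.range (n + 1)).map (fun j => if 1 ≤ j ∧ j ≤ k then price * (tri j : Int) else 0)

theorem stateA_init (price : Int) (n : Nat) (_hn : 1 ≤ n) :
    PySem.List.pySetD (List.replicate (n + 1) (0 : Int)) 1 price = stateA price n 1 := by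
  have h1 : PySem.List.pySetD (List.replicate (n + 1) (0 : Int)) 1 price
      = (List.replicate (n + 1) (0 : Int)).set 1 price := by
    simpa using PySem.List.pySetD_natCast (List.replicate (n + 1) (0 : Int)) 1 price
  rw [h1]
  apply List.ext_getElem
  · simp [stateA]
  · intro i hi hi'
    simp only [stateA, List.getElem_set, List.getElem_map, List.getElem_range,
      List.getElem_replicate]
    by_cases h : i = 1
    · subst h; norm_num [tri]
    · rw [if_neg (by omega), if_neg (by omega)]

theorem stateA_step (price : Int) (n k : Nat) (h1 : 1 ≤ k) (hk : k + 1 ≤ n) :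
    PySem.List.pySetD (stateA price n k) ((k : Int) + 1)
      (PySem.List.pyGetD (stateA price n k) ((k : Int) + 1 - 1) 0 + ((k : Int) + 1) * price)
      = stateA price n (k + 1) := by
  have hget : PySem.List.pyGetD (stateA price n k) ((k : Int) + 1 - 1) 0 = price * (tri k : Int) := by
    have : (k : Int) + 1 - 1 = ((k : Nat) : Int) := by ring
    rw [this, PySem.List.pyGetD_natCast]
    simp [stateA, List.getD, (by omega : k < n + 1), h1]
  have hcast : ((k : Int) + 1) = (((k + 1 : Nat)) : Int) := by push_cast; ring
  rw [hget, hcast, PySem.List.pySetD_natCast]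
  apply List.ext_getElem
  · simp [stateA]
  · intro i hi hi'
    have hin : i < n + 1 := by simpa [stateA] using hi
    simp only [stateA, List.getElem_set, List.getElem_map, List.getElem_range]
    by_cases hik : k + 1 = i
    · subst hik
      rw [if_pos rfl, if_pos (by omega), tri_succ]
      push_cast; ring
    · rw [if_neg hik]
      split_ifs <;> first | rfl | (exfalso; omega)

theorem stateA_loop (price : Int) (n : Nat) (k : Nat) (h1 : 1 ≤ k) (hk : k ≤ n) :
    (PySem.List.pyRange 2 ((k : Int) + 1) 1).foldl
        (fun x i => PySem.List.pySetD x i (PySem.List.pyGetD x (i - 1) 0 + i * price))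
        (stateA price n 1)
      = stateA price n k := by
  induction k with
  | zero => omega
  | succ m ih =>
    by_cases hm : 1 ≤ m
    · have hr : PySem.List.pyRange 2 ((m : Int) + 1 + 1) 1
          = PySem.List.pyRange 2 ((m : Int) + 1) 1 ++ [(m : Int) + 1] := by
        exact PySem.List.pyRange_one_succ_right (by omega)
      have : ((m + 1 : Nat) : Int) + 1 = (m : Int) + 1 + 1 := by push_cast; ring
      rw [this, hr, List.foldl_append, ih hm (by omega)]
      simpa using stateA_step price n m hm (by omega)
    · have hm0 : m = 0 := by omega
      subst hm0
      have : ((1 : Nat) : Int) + 1 = 2 := by norm_num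
      rw [this, PySem.List.pyRange_one_eq_nil (by omega)]
      simp

theorem stateA_last (price : Int) (n : Nat) (hn : 1 ≤ n) :
    PySem.List.pyGetD (stateA price n n) (-1) 0 = price * (tri n : Int) := by
  have hlen : (stateA price n n).length = n + 1 := by simp [stateA]
  rw [PySem.List.pyGetD_neg_ofNat (stateA price n n) 1 0 (by omega) (by omega)]
  simp [stateA, hn]

theorem closed_form (price : Int) (n : Nat) :
    PySem.Int.floordiv (price * (n : Int) * ((n : Int) + 1)) 2 = price * (tri n : Int) := by
  have h2 : (n * (n + 1) : Nat) = 2 * tri n := by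
    obtain ⟨c, hc⟩ := Nat.even_mul_succ_self n
    unfold tri; omega
  have : price * (n : Int) * ((n : Int) + 1) = 2 * (price * (tri n : Int)) := by
    have := congrArg (fun m : Nat => (m : Int)) h2
    push_cast at this
    rw [mul_assoc, this]; ring
  rw [this, PySem.Int.floordiv_eq_ediv_of_pos (by omega)]
  exact Int.mul_ediv_cancel_left _ (by omega)

-- ===== VERDICT (by name: the statement is the Claim_ definition above) =====
theorem solution_spec : Claim_equal_solution := by
  intro price money count _ hpre
  unfold Pre_solution at hpre
  unfold Spec_solution
  simp only [solution, solution_alt]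
  obtain ⟨n, hn⟩ : ∃ n : Nat, count = (n : Int) := ⟨count.toNat, by omega⟩
  subst hn
  have hn1 : 1 ≤ n := by omega
  have hrep : ((n : Int) + 1).toNat = n + 1 := by omega
  have hlast : PySem.List.pyGetD
      (if (n : Int) ≥ 2 then
        (PySem.List.pyRange 2 ((n : Int) + 1) 1).foldl
          (fun x i => PySem.List.pySetD x i (PySem.List.pyGetD x (i - 1) 0 + i * price))
          (PySem.List.pySetD (List.replicate ((n : Int) + 1).toNat (0 : Int)) 1 price)
       else PySem.List.pySetD (List.replicate ((n : Int) + 1).toNat (0 : Int)) 1 price)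
      (-1) 0 = price * (tri n : Int) := by
    rw [hrep, stateA_init price n hn1]
    by_cases h2 : (n : Int) ≥ 2
    · rw [if_pos h2, stateA_loop price n n hn1 (le_refl n)]
      exact stateA_last price n hn1
    · have : n = 1 := by omega
      subst this
      rw [if_neg h2]
      exact stateA_last price 1 (le_refl 1)
  rw [hlast, closed_form]
  omega
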